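-- pv_equiv track=rewrite | github.com/Cyras117/Codility_Nickel_2018 | main.py | solution
-- ===== SOURCE A (Python) =====
-- def total_t(arr):
--     """
--     Returns the total of nodes with value "TRUE" in a given array
--     """
--     count = 0
--     for x in arr:
--         if x == True:
--             count += 1
--     return count
--
-- def g_fam(arr):
--     """
--     Returns the next array
--     """
--     aux = 0
--     hol = []
--     while(aux +1 < arr.__len__()):
--         if arr[aux] or arr[aux + 1]:
--             hol.append(True)
--         else:
--             hol.append(False)
--         aux += 1
--     return hol
--
-- def solution(P):
--     """
--     Returns the total nodes with value "TRUE" in a given OR-Pascal-triangle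
--     """
--     co = P
--     total = 0
--     if co.__len__() <= 1:
--         return
--     for x in range(co.__len__()):
--         total += total_t(co)
--         co = g_fam(co)
--     return total
-- ===== SOURCE B (Python) =====
-- def solution(P):
--     """
--     Returns the total nodes with value "TRUE" in a given OR-Pascal-triangle,
--     computed in one pass: a window P[i:j] ORs to True unless it lies wholly
--     inside a maximal run of Falses, so
--       total = n(n+1)/2 - sum over maximal False-runs of length r of r(r+1)/2.
--     """
--     n = len(P)
--     if n <= 1:
--         return
--     total = n * (n + 1) // 2
--     run = 0
--     for x in P:
--         if x:
--             total -= run * (run + 1) // 2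
--             run = 0
--         else:
--             run += 1
--     total -= run * (run + 1) // 2
--     return total
-- ===== Notes on version B (the rewrite author's own statement) =====
-- stated objective: faster
-- what changed: Instead of materialising every level of the OR-Pascal triangle (n passes of re-ORing adjacent pairs and recounting), B uses that a window ORs to False exactly when it lies inside a maximal False-run, so one pass over P computing total = n(n+1)/2 - sum of r(r+1)/2 over maximal False-runs of length r gives the answer.
import Mathlib
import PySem

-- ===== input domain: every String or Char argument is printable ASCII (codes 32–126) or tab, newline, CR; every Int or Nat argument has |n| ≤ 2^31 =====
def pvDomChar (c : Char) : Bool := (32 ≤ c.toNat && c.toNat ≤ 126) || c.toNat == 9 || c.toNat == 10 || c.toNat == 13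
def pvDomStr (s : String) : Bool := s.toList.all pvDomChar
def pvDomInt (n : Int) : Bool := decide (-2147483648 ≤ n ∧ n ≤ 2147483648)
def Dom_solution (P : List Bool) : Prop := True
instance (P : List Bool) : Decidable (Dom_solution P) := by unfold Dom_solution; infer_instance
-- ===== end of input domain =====

-- B replaces A's O(n^2) level-by-level rebuild of the OR triangle by a single
-- pass over P using False-run arithmetic (asymptotically faster; return value only).

-- ===== PORT A =====

-- total_t: count elements equal to True
def total_t (arr : List Bool) : Int :=
  arr.foldl (fun count x => if x = true then count + 1 else count) 0

-- g_fam's while loop: state (aux, hol); runs while aux + 1 < len(arr)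
def g_famAux (arr : List Bool) (aux : Nat) (hol : List Bool) : List Bool :=
  if h : aux + 1 < arr.length then
    g_famAux arr (aux + 1)
      (hol ++ [(PySem.List.pyGetD arr (aux : Int) false) || (PySem.List.pyGetD arr ((aux : Int) + 1) false)])
  else hol
termination_by arr.length - aux

def g_fam (arr : List Bool) : List Bool := g_famAux arr 0 []

def solution (P : List Bool) : Option Int :=
  if P.length ≤ 1 then none
  else
    let st := (PySem.List.pyRange 0 (P.length : Int) 1).foldl
      (fun (s : List Bool × Int) _ => (g_fam s.1, s.2 + total_t s.1)) (P, 0)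
    some st.2

-- ===== PORT B =====

def solution_alt (P : List Bool) : Option Int :=
  let n : Int := (P.length : Int)
  if P.length ≤ 1 then none
  else
    let st := P.foldl
      (fun (s : Int × Int) x =>
        if x then (s.1 - PySem.Int.floordiv (s.2 * (s.2 + 1)) 2, 0)
        else (s.1, s.2 + 1))
      (PySem.Int.floordiv (n * (n + 1)) 2, 0)
    some (st.1 - PySem.Int.floordiv (st.2 * (st.2 + 1)) 2)

-- ===== PRECONDITION & SPEC =====
def Spec_solution (P : List Bool) (out : Option Int) : Prop := out = solution_alt P
instance (P : List Bool) (out : Option Int) : Decidable (Spec_solution P out) := by unfold Spec_solution; infer_instance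

-- ===== CLAIM (what is proved, stated in full; the proofs are below) =====
def Claim_equal_solution : Prop := ∀ (P : List Bool), Dom_solution P → Spec_solution P (solution P)

-- ===== LEMMAS AND PROOFS =====

-- structural version of g_fam: adjacent ORs
def gS : List Bool → List Bool
  | [] => []
  | [_] => []
  | a :: b :: t => (a || b) :: gS (b :: t)

-- triangle numbers
def triN : Nat → Int
  | 0 => 0
  | r + 1 => triN r + (r + 1)

-- B's run-closing scan, with the pending False-run length as a parameter
def FrunN : List Bool → Nat → Int
  | [], r => triN r
  | true :: t, r => triN r + FrunN t 0
  | false :: t, r => FrunN t (r + 1)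

-- number of Falses
def fcN : List Bool → Nat
  | [] => 0
  | true :: t => fcN t
  | false :: t => fcN t + 1

-- A's counting loop over the levels
def loopS : Nat → List Bool → Int
  | 0, _ => 0
  | k + 1, co => total_t co + loopS k (gS co)

-- pending-run parameter for the key lemma: the False-run of gS t entering the scan
def prN : List Bool → Nat → Nat
  | false :: _, r => r
  | _, r => r - 1

theorem triN_pred (r : Nat) : triN r = triN (r - 1) + r := by
  cases r with
  | zero => simp [triN]
  | succ k => simp [triN]

-- shift lemma for lists that are empty or start with true
theorem FrunN_shift_gS_true (t : List Bool) (r : Nat) :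
    FrunN (gS (true :: t)) r = triN r + FrunN (gS (true :: t)) 0 := by
  cases t with
  | nil => simp [gS, FrunN, triN]
  | cons c t3 => simp [gS, FrunN, triN]

-- key lemma: one level of the OR triangle removes one inhabitant from every False-run
theorem FrunN_gS (t : List Bool) : ∀ r : Nat,
    FrunN t r = (fcN t : Int) + r + FrunN (gS t) (prN t r) := by
  induction t with
  | nil =>
    intro r
    simp only [FrunN, gS, fcN, prN]
    rw [triN_pred]
    push_cast
    ring
  | cons a t' IH =>
    intro r
    cases a with
    | true =>
      cases t' with
      | nil =>
        simp only [FrunN, gS, fcN, prN, triN]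
        rw [triN_pred]
        push_cast; ring
      | cons b t'' =>
        have h0 := IH 0
        have hpr0 : prN (b :: t'') 0 = 0 := by cases b <;> simp [prN]
        rw [hpr0] at h0
        simp only [FrunN, gS, fcN, prN, Bool.true_or]
        rw [h0, triN_pred r]
        push_cast; ring
    | false =>
      cases t' with
      | nil =>
        simp only [FrunN, gS, fcN, prN, triN]
        push_cast; ring
      | cons b t'' =>
        have h := IH (r + 1)
        cases b with
        | true =>
          have hpr : prN (true :: t'') (r + 1) = r := by simp [prN]
          rw [hpr] at h
          have hsh := FrunN_shift_gS_true t'' r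
          simp only [FrunN, gS, fcN, prN, Bool.false_or] at h ⊢
          push_cast at h ⊢
          linarith
        | false =>
          have hpr : prN (false :: t'') (r + 1) = r + 1 := by simp [prN]
          rw [hpr] at h
          simp only [FrunN, gS, fcN, prN, Bool.false_or] at h ⊢
          push_cast at h ⊢
          linarith

theorem FrunN_gS_zero (t : List Bool) :
    FrunN t 0 = (fcN t : Int) + FrunN (gS t) 0 := by
  have h := FrunN_gS t 0
  have : prN t 0 = 0 := by cases t with
    | nil => simp [prN]
    | cons a t' => cases a <;> simp [prN]
  rw [this] at h
  simpa using h

-- lengths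
theorem gS_length (t : List Bool) : (gS t).length = t.length - 1 := by
  induction t with
  | nil => simp [gS]
  | cons a t' IH =>
    cases t' with
    | nil => simp [gS]
    | cons b t'' => simp only [gS, List.length_cons] at *; omega

-- true-count + false-count = length
def tcN : List Bool → Nat
  | [] => 0
  | true :: t => tcN t + 1
  | false :: t => tcN t

theorem total_t_foldl (t : List Bool) : ∀ c : Int,
    t.foldl (fun count x => if x = true then count + 1 else count) c = c + (tcN t : Int) := by
  induction t with
  | nil => intro c; simp [tcN]
  | cons a t' IH =>
    intro c
    cases a <;> simp [List.foldl, tcN, IH] <;> omega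

theorem total_t_eq (t : List Bool) : total_t t = (t.length : Int) - (fcN t : Int) := by
  have h : tcN t + fcN t = t.length := by
    induction t with
    | nil => simp [tcN, fcN]
    | cons a t' IH => cases a <;> simp [tcN, fcN] <;> omega
  rw [total_t, total_t_foldl t 0]
  omega

-- the main invariant: A's n-level sum is the triangular total minus the False-run total
theorem loopS_eq : ∀ (n : Nat) (co : List Bool), co.length = n →
    loopS n co = triN n - FrunN co 0 := by
  intro n
  induction n with
  | zero =>
    intro co h
    have : co = [] := List.length_eq_zero_iff.mp h
    subst this; simp [loopS, triN, FrunN]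
  | succ k IH =>
    intro co h
    have hg : (gS co).length = k := by rw [gS_length]; omega
    rw [loopS, IH (gS co) hg, total_t_eq, FrunN_gS_zero co]
    simp only [triN, h]
    push_cast; ring

-- g_famAux computes gS of the dropped suffix
theorem gS_short (l : List Bool) (h : l.length ≤ 1) : gS l = [] := by
  match l, h with
  | [], _ => rfl
  | [_], _ => rfl

theorem gS_drop_cons (arr : List Bool) (aux : Nat) (h : aux + 1 < arr.length) :
    gS (arr.drop aux) = (arr[aux] || arr[aux + 1]) :: gS (arr.drop (aux + 1)) := by
  have h1 : aux < arr.length := by omega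
  rw [List.drop_eq_getElem_cons h1, List.drop_eq_getElem_cons h]
  rw [gS, ← List.drop_eq_getElem_cons h]

theorem g_famAux_eq (arr : List Bool) : ∀ (aux : Nat) (hol : List Bool),
    g_famAux arr aux hol = hol ++ gS (arr.drop aux) := by
  have main : ∀ (fuel aux : Nat), arr.length - aux ≤ fuel → ∀ hol,
      g_famAux arr aux hol = hol ++ gS (arr.drop aux) := by
    intro fuel
    induction fuel with
    | zero =>
      intro aux hf hol
      rw [g_famAux]
      have hcond : ¬ (aux + 1 < arr.length) := by omega
      rw [dif_neg hcond]
      rw [gS_short (arr.drop aux) (by simp; omega)]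
      simp
    | succ k IHf =>
      intro aux hf hol
      rw [g_famAux]
      by_cases hcond : aux + 1 < arr.length
      · rw [dif_pos hcond]
        rw [IHf (aux + 1) (by omega)]
        rw [gS_drop_cons arr aux hcond]
        have e1 : PySem.List.pyGetD arr ((aux : Nat) : Int) false = arr[aux] := by
          rw [PySem.List.pyGetD_natCast]
          exact List.getD_eq_getElem arr false (by omega)
        have e2 : PySem.List.pyGetD arr (((aux : Nat) : Int) + 1) false = arr[aux + 1] := by
          have hc : ((aux : Nat) : Int) + 1 = ((aux + 1 : Nat) : Int) := by push_cast; ring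
          rw [hc, PySem.List.pyGetD_natCast]
          exact List.getD_eq_getElem arr false (by omega)
        rw [e1, e2]
        simp
      · rw [dif_neg hcond]
        rw [gS_short (arr.drop aux) (by simp; omega)]
        simp
  intro aux hol
  exact main (arr.length - aux) aux le_rfl hol

theorem g_fam_eq (arr : List Bool) : g_fam arr = gS arr := by
  rw [g_fam, g_famAux_eq arr 0 []]; simp

-- A's for-loop, as a fold that only uses the length of the range list
theorem foldA (l : List Int) : ∀ (co : List Bool) (total : Int),
    (l.foldl (fun (s : List Bool × Int) _ => (g_fam s.1, s.2 + total_t s.1)) (co, total)).2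
      = total + loopS l.length co := by
  induction l with
  | nil => intro co total; simp [loopS]
  | cons a l' IH =>
    intro co total
    simp only [List.foldl, List.length_cons, loopS]
    rw [g_fam_eq, IH (gS co) (total + total_t co)]
    ring

-- B's fold
theorem floordiv_tri (r : Nat) : PySem.Int.floordiv ((r : Int) * ((r : Int) + 1)) 2 = triN r := by
  have h2 : (r : Int) * ((r : Int) + 1) = 2 * triN r := by
    induction r with
    | zero => simp [triN]
    | succ k IH => simp only [triN]; push_cast; push_cast at IH; nlinarith [IH]
  rw [h2, PySem.Int.floordiv_eq_ediv_of_pos (by norm_num)]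
  exact Int.mul_ediv_cancel_left _ (by norm_num)

theorem foldB (t : List Bool) : ∀ (T : Int) (r : Nat),
    (fun st : Int × Int => st.1 - PySem.Int.floordiv (st.2 * (st.2 + 1)) 2)
      (t.foldl (fun (s : Int × Int) x =>
        if x then (s.1 - PySem.Int.floordiv (s.2 * (s.2 + 1)) 2, 0)
        else (s.1, s.2 + 1)) (T, (r : Int)))
      = T - FrunN t r := by
  induction t with
  | nil =>
    intro T r
    simp only [List.foldl, FrunN]
    rw [floordiv_tri]
  | cons a t' IH =>
    intro T r
    cases a with
    | true =>
      simp only [List.foldl, FrunN, reduceIte]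
      have := IH (T - PySem.Int.floordiv ((r : Int) * ((r : Int) + 1)) 2) 0
      simp only [Nat.cast_zero] at this
      rw [this, floordiv_tri]
      ring
    | false =>
      simp only [List.foldl, FrunN, Bool.false_eq_true, reduceIte]
      have := IH T (r + 1)
      push_cast at this
      rw [this]

theorem solution_spec : Claim_equal_solution := by
  intro P _
  unfold Spec_solution solution solution_alt
  by_cases h : P.length ≤ 1
  · simp [h]
  · simp only [h, if_false]
    have hlen : (PySem.List.pyRange 0 (P.length : Int) 1).length = P.length := by
      rw [PySem.List.length_pyRange_one]; omega
    have hA := foldA (PySem.List.pyRange 0 (P.length : Int) 1) P 0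
    rw [hlen] at hA
    have hB := foldB P (PySem.Int.floordiv ((P.length : Int) * ((P.length : Int) + 1)) 2) 0
    simp only [Nat.cast_zero] at hB
    rw [floordiv_tri] at hB
    simp only [hA, zero_add]
    rw [loopS_eq P.length P rfl, floordiv_tri P.length, hB]
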